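-- pv_equiv track=rewrite | github.com/bahartires-hue/audit-system | auditflow/backend/app/routers/cashierko_api.py | _permission_map
-- ===== SOURCE A (Python) =====
-- def _permission_map(role: str) -> dict[str, bool]:
--     role = (role or "user").strip().lower()
--     base = {
--         "dashboard.view": True,
--         "items.view": True,
--         "items.edit": False,
--         "sales.create": False,
--         "sales.edit": False,
--         "purchases.create": False,
--         "inventory.adjust": False,
--         "returns.manage": False,
--         "reports.view": True,
--         "settings.manage": False,
--         "users.manage": False,
--         "transfers.manage": False,
--     }
--     if role in {"cashier"}:
--         base.update({"sales.create": True, "sales.edit": True})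
--     if role in {"inventory"}:
--         base.update({"items.edit": True, "inventory.adjust": True, "transfers.manage": True})
--     if role in {"accountant"}:
--         base.update({"purchases.create": True, "returns.manage": True, "reports.view": True})
--     if role in {"manager"}:
--         for k in list(base.keys()):
--             if k != "users.manage":
--                 base[k] = True
--     if role in {"admin"}:
--         for k in list(base.keys()):
--             base[k] = True
--     return base
-- ===== SOURCE B (Python) =====
-- ALL_KEYS = [
--     "dashboard.view", "items.view", "items.edit", "sales.create",
--     "sales.edit", "purchases.create", "inventory.adjust", "returns.manage",
--     "reports.view", "settings.manage", "users.manage", "transfers.manage",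
-- ]
--
-- # Permission sets encoded as 12-bit masks (bit i <-> ALL_KEYS[i]).
-- DEFAULT_MASK = 0b000100000011          # dashboard.view, items.view, reports.view
-- ROLE_MASK = {
--     "cashier":    0b000100011011,      # default + sales.create, sales.edit
--     "inventory":  0b100101000111,      # default + items.edit, inventory.adjust, transfers.manage
--     "accountant": 0b000110100011,  # default + purchases.create, returns.manage, reports.view
--     "manager":    0b101111111111,      # everything except users.manage
--     "admin":      0b111111111111,      # everything
-- }
--
--
-- def _permission_map(role: str) -> dict[str, bool]:
--     role = (role or "user").strip().lower()
--     mask = ROLE_MASK.get(role, DEFAULT_MASK)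
--     return {k: mask // 2**i % 2 == 1 for i, k in enumerate(ALL_KEYS)}
-- ===== Notes on version B (the rewrite author's own statement) =====
-- stated objective: alternative
-- what changed: Replaces A's dict built by five sequential conditional update/loop branches with a bitmask encoding: each role maps to one 12-bit integer in a lookup table and the result is decoded by testing bit i for the i-th key in a single enumerate pass.
import Mathlib
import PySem

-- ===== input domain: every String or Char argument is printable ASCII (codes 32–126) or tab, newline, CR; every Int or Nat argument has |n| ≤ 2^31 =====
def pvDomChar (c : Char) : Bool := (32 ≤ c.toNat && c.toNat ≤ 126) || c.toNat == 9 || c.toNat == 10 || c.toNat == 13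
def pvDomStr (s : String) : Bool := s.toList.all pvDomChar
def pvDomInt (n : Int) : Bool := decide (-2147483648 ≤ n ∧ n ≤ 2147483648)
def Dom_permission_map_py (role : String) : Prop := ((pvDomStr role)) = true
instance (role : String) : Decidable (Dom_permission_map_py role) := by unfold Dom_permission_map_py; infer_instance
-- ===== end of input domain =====

-- B replaces A's sequential dict-update branches by a per-role 12-bit permission mask looked up in a
-- table and decoded positionally over the fixed key list (objective: alternative/simpler encoding).


-- shared normalization: (role or "user").strip().lower()
def pvNorm (role : String) : String :=
  PySem.Str.lower (PySem.Str.strip (if role == "" then "user" else role))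

-- ===== PORT A =====
def permission_map_py (role : String) : List (String × Bool) :=
  let r := pvNorm role
  let base : PySem.Dict String Bool := PySem.Dict.ofList
    [("dashboard.view", true), ("items.view", true), ("items.edit", false),
     ("sales.create", false), ("sales.edit", false), ("purchases.create", false),
     ("inventory.adjust", false), ("returns.manage", false), ("reports.view", true),
     ("settings.manage", false), ("users.manage", false), ("transfers.manage", false)]
  let base := if r = "cashier" then
      (base.insert "sales.create" true).insert "sales.edit" true else base
  let base := if r = "inventory" then
      ((base.insert "items.edit" true).insert "inventory.adjust" true).insert "transfers.manage" true else base
  let base := if r = "accountant" then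
      ((base.insert "purchases.create" true).insert "returns.manage" true).insert "reports.view" true else base
  let base := if r = "manager" then
      base.keys.foldl (fun d k => if k ≠ "users.manage" then d.insert k true else d) base else base
  let base := if r = "admin" then
      base.keys.foldl (fun d k => d.insert k true) base else base
  base.items

-- ===== PORT B =====
def pvAllKeys : List String :=
  ["dashboard.view", "items.view", "items.edit", "sales.create",
   "sales.edit", "purchases.create", "inventory.adjust", "returns.manage",
   "reports.view", "settings.manage", "users.manage", "transfers.manage"]

-- 12-bit masks, bit i <-> pvAllKeys[i]
def pvDefaultMask : Int := 0b000100000011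
def pvRoleMask : PySem.Dict String Int := PySem.Dict.ofList
  [("cashier", 0b000100011011), ("inventory", 0b100101000111),
   ("accountant", 0b000110100011), ("manager", 0b101111111111),
   ("admin", 0b111111111111)]

def permission_map_py_alt (role : String) : List (String × Bool) :=
  let r := pvNorm role
  let mask := pvRoleMask.getD r pvDefaultMask
  (PySem.List.enumerate pvAllKeys).map
    (fun ik => (ik.2, PySem.Int.mod (PySem.Int.floordiv mask (2 ^ ik.1.toNat)) 2 == 1))

-- ===== PRECONDITION & SPEC =====
def Spec_permission_map_py (role : String) (out : List (String × Bool)) : Prop := out = permission_map_py_alt role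
instance (role : String) (out : List (String × Bool)) : Decidable (Spec_permission_map_py role out) := by unfold Spec_permission_map_py; infer_instance

-- ===== CLAIM (what is proved, stated in full; the proofs are below) =====
def Claim_equal_permission_map_py : Prop := ∀ (role : String), Dom_permission_map_py role → Spec_permission_map_py role (permission_map_py role)

-- ===== LEMMAS AND PROOFS =====
lemma pv_mask_other (r : String) (h1 : ¬r = "admin") (h2 : ¬r = "manager") (h3 : ¬r = "cashier")
    (h4 : ¬r = "inventory") (h5 : ¬r = "accountant") :
    pvRoleMask.getD r pvDefaultMask = pvDefaultMask := by
  have e : pvRoleMask = PySem.Dict.mk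
      [("cashier", 0b000100011011), ("inventory", 0b100101000111),
       ("accountant", 0b000110100011), ("manager", 0b101111111111),
       ("admin", 0b111111111111)] := rfl
  simp [e, PySem.Dict.getD, PySem.Dict.get?, beq_iff_eq,
    Ne.symm h1, Ne.symm h2, Ne.symm h3, Ne.symm h4, Ne.symm h5]

-- ===== VERDICT (by name: the statement is the Claim_ definition above) =====
theorem permission_map_py_spec : Claim_equal_permission_map_py := by
  intro role _
  unfold Spec_permission_map_py
  simp only [permission_map_py, permission_map_py_alt]
  generalize pvNorm role = r
  by_cases h1 : r = "admin"
  · subst h1; decide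
  by_cases h2 : r = "manager"
  · subst h2; decide
  by_cases h3 : r = "cashier"
  · subst h3; decide
  by_cases h4 : r = "inventory"
  · subst h4; decide
  by_cases h5 : r = "accountant"
  · subst h5; decide
  simp only [if_neg h1, if_neg h2, if_neg h3, if_neg h4, if_neg h5,
    pv_mask_other r h1 h2 h3 h4 h5]
  decide
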